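-- pv_equiv track=rewrite | github.com/EvgR7/tg-joke-bot | translate.py | str_to_word
-- ===== SOURCE A (Python) =====
-- def str_to_word(some_str):
--     final = []
--     words = some_str.split()
--     check = ['!', '?', '.', ':', ';', ',', '"',"'"]
--     for word in words:
--         word = word.strip()
--         word = word.lower()
--         for sign in check:
--             word = word.replace(sign,'')
--         final.append(word)
--     return final
-- ===== SOURCE B (Python) =====
-- def str_to_word(some_str):
--     punct = set('!?.:;,"\'')
--     return [''.join(c for c in word.lower() if c not in punct)
--             for word in some_str.split()]
-- ===== Notes on version B (the rewrite author's own statement) =====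
-- stated objective: idiomatic
-- what changed: Replaces the per-word loop of eight whole-word str.replace passes (plus a redundant strip) by one linear filter pass per word against a punctuation set, collected with a comprehension.
import Mathlib
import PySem

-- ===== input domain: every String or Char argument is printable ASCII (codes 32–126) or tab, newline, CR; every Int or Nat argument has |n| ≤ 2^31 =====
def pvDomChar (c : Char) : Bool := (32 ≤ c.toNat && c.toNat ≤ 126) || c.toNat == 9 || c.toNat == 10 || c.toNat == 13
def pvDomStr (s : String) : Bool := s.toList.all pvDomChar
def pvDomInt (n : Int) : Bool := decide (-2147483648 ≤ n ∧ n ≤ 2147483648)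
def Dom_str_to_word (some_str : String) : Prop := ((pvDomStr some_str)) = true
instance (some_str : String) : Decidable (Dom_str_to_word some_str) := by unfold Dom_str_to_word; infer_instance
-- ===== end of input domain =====

-- B replaces A's eight whole-word replace passes (and the redundant strip) by one filter pass per word against a punctuation set (idiomatic rewrite).

-- ===== PORT A =====
def str_to_word (some_str : String) : List String :=
  let final : List String := []
  let words := PySem.Str.split₀ some_str
  let check : List String := ["!", "?", ".", ":", ";", ",", "\"", "'"]
  words.foldl (fun final word =>
    let word := PySem.Str.strip word
    let word := PySem.Str.lower word
    let word := check.foldl (fun word sign => PySem.Str.replace word sign "") word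
    final ++ [word]) final

-- ===== PORT B =====
def pvPunct : PySem.Set Char := PySem.Set.ofList ['!', '?', '.', ':', ';', ',', '"', '\'']

-- ''.join over the kept single characters is exactly String.ofList of the filtered character list (exact).
def str_to_word_alt (some_str : String) : List String :=
  (PySem.Str.split₀ some_str).map (fun word =>
    String.ofList (((PySem.Str.lower word).toList).filter (fun c => !(decide (c ∈ pvPunct)))))

-- ===== PRECONDITION & SPEC =====
def Spec_str_to_word (some_str : String) (out : List String) : Prop := out = str_to_word_alt some_str
instance (some_str : String) (out : List String) : Decidable (Spec_str_to_word some_str out) := by unfold Spec_str_to_word; infer_instance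

-- ===== CLAIM (what is proved, stated in full; the proofs are below) =====
def Claim_equal_str_to_word : Prop := ∀ (some_str : String), Dom_str_to_word some_str → Spec_str_to_word some_str (str_to_word some_str)

-- ===== LEMMAS AND PROOFS =====

-- replace.go with a single-char needle and empty replacement is a filter
theorem pv_go_filter (c : Char) (l : List Char) (fuel : Nat) (acc : List Char)
    (h : l.length ≤ fuel) :
    PySem.Chars.replace.go [c] [] fuel l acc = acc.reverse ++ l.filter (fun d => !(d == c)) := by
  induction l generalizing fuel acc with
  | nil => cases fuel <;> simp [PySem.Chars.replace.go]
  | cons d t ih =>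
      cases fuel with
      | zero => simp at h
      | succ f =>
          simp only [PySem.Chars.replace.go]
          by_cases hd : d = c
          · subst hd
            rw [if_pos (by simp [List.isPrefixOf])]
            simp [ih f acc (by simpa using h)]
          · rw [if_neg (by simp [List.isPrefixOf]; exact fun hc => hd hc.symm)]
            rw [ih f (d :: acc) (by simpa using h)]
            simp [hd]

theorem pv_replace_filter (s : List Char) (c : Char) :
    PySem.Chars.replace s [c] [] = s.filter (fun d => !(d == c)) := by
  simp [PySem.Chars.replace, pv_go_filter c s s.length [] le_rfl]

-- every word produced by split() contains no whitespace character
theorem pv_split_go_nospace (s : List Char) : ∀ (cur : List Char) (acc : List (List Char)),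
    (∀ ch ∈ cur, PySem.Chars.isspace ch = false) →
    (∀ w ∈ acc, ∀ ch ∈ w, PySem.Chars.isspace ch = false) →
    ∀ w ∈ PySem.Chars.split₀.go s cur acc, ∀ ch ∈ w, PySem.Chars.isspace ch = false := by
  induction s with
  | nil =>
      intro cur acc hcur hacc w hw
      simp only [PySem.Chars.split₀.go] at hw
      split at hw
      · simp at hw; exact hacc _ (by simpa using hw)
      · simp at hw
        rcases hw with h | h
        · exact hacc _ h
        · subst h; intro ch hch; exact hcur ch (by simpa using hch)
  | cons c rest ih =>
      intro cur acc hcur hacc w hw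
      simp only [PySem.Chars.split₀.go] at hw
      split at hw
      · split at hw
        · exact ih [] acc (by simp) hacc w hw
        · refine ih [] (cur.reverse :: acc) (by simp) ?_ w hw
          intro v hv
          rcases List.mem_cons.mp hv with h | h
          · subst h; intro ch hch; exact hcur ch (by simpa using hch)
          · exact hacc v h
      · rename_i hc
        refine ih (c :: cur) acc ?_ hacc w hw
        intro ch hch
        rcases List.mem_cons.mp hch with h | h
        · subst h; simpa using hc
        · exact hcur ch h

theorem pv_split₀_nospace (s : List Char) :
    ∀ w ∈ PySem.Chars.split₀ s, ∀ ch ∈ w, PySem.Chars.isspace ch = false :=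
  pv_split_go_nospace s [] [] (by simp) (by simp)

-- strip is the identity on whitespace-free words
theorem pv_strip_eq (w : List Char) (h : ∀ ch ∈ w, PySem.Chars.isspace ch = false) :
    PySem.Chars.strip w = w := by
  have h1 : PySem.Chars.lstrip w = w := by
    simp only [PySem.Chars.lstrip, List.dropWhile_eq_self_iff]
    intro hx
    exact fun hc => by simp [h _ (List.getElem_mem hx)] at hc
  have h2 : PySem.Chars.rstrip w = w := by
    have hr : List.dropWhile PySem.Chars.isspace w.reverse = w.reverse := by
      simp only [List.dropWhile_eq_self_iff]
      intro hx
      exact fun hc => by rw [h _ (List.mem_reverse.mp (List.getElem_mem hx))] at hc; simp at hc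
    simp [PySem.Chars.rstrip, hr]
  simp [PySem.Chars.strip, h1, h2]

-- A's append-accumulating loop is a map
theorem pv_foldl_map (f : String → String) (l : List String) (init : List String) :
    l.foldl (fun acc w => acc ++ [f w]) init = init ++ l.map f := by
  induction l generalizing init with
  | nil => simp
  | cons a t ih => simp [ih]

-- the conjunction of the eight ≠-tests is non-membership in pvPunct
theorem pv_punct_pred (c : Char) :
    ((((((((!(c == '!')) && !(c == '?')) && !(c == '.')) && !(c == ':')) && !(c == ';')) && !(c == ',')) && !(c == '"')) && !(c == '\'')) = !(decide (c ∈ pvPunct)) := by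
  simp [pvPunct, PySem.Set.mem_ofList, List.mem_cons]
  by_cases h1 : c = '!' <;> by_cases h2 : c = '?' <;> by_cases h3 : c = '.' <;> by_cases h4 : c = ':' <;> by_cases h5 : c = ';' <;> by_cases h6 : c = ',' <;> by_cases h7 : c = '"' <;> by_cases h8 : c = '\'' <;> simp [h1,h2,h3,h4,h5,h6,h7,h8]

-- A's per-word pipeline equals B's single filter pass, for whitespace-free words
theorem pv_word_eq (w : String) (hw : ∀ ch ∈ w.toList, PySem.Chars.isspace ch = false) :
    (["!", "?", ".", ":", ";", ",", "\"", "'"].foldl (fun word sign => PySem.Str.replace word sign "") (PySem.Str.lower (PySem.Str.strip w)))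
      = String.ofList (((PySem.Str.lower w).toList).filter (fun c => !(decide (c ∈ pvPunct)))) := by
  rw [← String.toList_inj]
  simp only [List.foldl, PySem.Str.toList_replace, PySem.Str.toList_lower, PySem.Str.toList_strip]
  rw [pv_strip_eq _ hw]
  simp only [show ("!" : String).toList = ['!'] from rfl, show ("?" : String).toList = ['?'] from rfl,
    show ("." : String).toList = ['.'] from rfl, show (":" : String).toList = [':'] from rfl,
    show (";" : String).toList = [';'] from rfl, show ("," : String).toList = [','] from rfl,
    show ("\"" : String).toList = ['"'] from rfl, show ("'" : String).toList = ['\''] from rfl,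
    show ("" : String).toList = [] from rfl]
  simp only [pv_replace_filter, List.filter_filter]
  rw [String.toList_ofList]
  refine List.filter_congr ?_
  intro c _
  rw [← pv_punct_pred c]
  ac_rfl

-- ===== VERDICT (by name: the statement is the Claim_ definition above) =====
theorem str_to_word_spec : Claim_equal_str_to_word := by
  intro some_str _
  unfold Spec_str_to_word
  simp only [str_to_word, str_to_word_alt]
  rw [pv_foldl_map (fun word => ["!", "?", ".", ":", ";", ",", "\"", "'"].foldl (fun word sign => PySem.Str.replace word sign "") (PySem.Str.lower (PySem.Str.strip word)))]
  simp only [List.nil_append]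
  refine List.map_congr_left ?_
  intro w hw
  refine pv_word_eq w ?_
  have hm : w.toList ∈ PySem.Chars.split₀ some_str.toList := by
    rw [← PySem.Str.split₀_map_toList]
    exact List.mem_map_of_mem hw
  exact pv_split₀_nospace some_str.toList w.toList hm
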